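-- pv_equiv track=rewrite | github.com/Agraael/my_gomoku_ai | heuristic.py | diagonal_right_matrix
-- ===== SOURCE A (Python) =====
-- from typing import List
--
-- def diagonal_right_matrix(item: List[List[any]]) -> List[List[any]]:
--
--     """
--     cette function permet de creer une list de list contenant toute les diogonales de la matrix
--     (les diagonales ici sont des diagonales droite , elle partent donc de enhaut à gauche à en bas à droite)
--     """
--
--     new_item = []
--     size = len(item)
--
--     for j in range(size - 1, 0, -1):
--         new_item.append([item[i + j][i] for i in range(0, size - j)])
--     for j in range(0, size):
--         new_item.append([item[i][i + j] for i in range(0, size - j)])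
--     return new_item
-- ===== SOURCE B (Python) =====
-- def diagonal_right_matrix(item):
--     size = len(item)
--     groups = {}
--     for r in range(size):
--         row = item[r]
--         for c in range(size):
--             groups.setdefault(r - c, []).append(row[c])
--     return [groups[d] for d in range(size - 1, -size, -1)]
-- ===== Notes on version B (the rewrite author's own statement) =====
-- stated objective: alternative
-- what changed: Replaces A's two diagonal-directed loops (one per triangle of the matrix) by a single row-major pass that groups entries into a dict keyed by r-c, then reads the diagonals off in descending key order.
import Mathlib
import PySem

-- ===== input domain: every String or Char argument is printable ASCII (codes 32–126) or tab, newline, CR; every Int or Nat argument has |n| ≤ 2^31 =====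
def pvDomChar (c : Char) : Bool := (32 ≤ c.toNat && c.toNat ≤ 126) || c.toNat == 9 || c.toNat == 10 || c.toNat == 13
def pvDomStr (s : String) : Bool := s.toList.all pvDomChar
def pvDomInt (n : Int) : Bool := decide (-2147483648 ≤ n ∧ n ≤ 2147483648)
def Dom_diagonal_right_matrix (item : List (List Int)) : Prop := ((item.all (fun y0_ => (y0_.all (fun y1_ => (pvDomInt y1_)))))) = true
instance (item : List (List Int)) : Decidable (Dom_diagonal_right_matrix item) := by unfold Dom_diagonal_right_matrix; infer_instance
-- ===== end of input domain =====

-- B replaces A's two diagonal-directed loops by one row-major pass that groups entries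
-- into a dict keyed by r-c and then reads the diagonals off in descending key order
-- (objective: alternative decomposition, same asymptotic cost).

-- item[r][c]: total reading of Python's indexing; exact whenever 0 ≤ r < len(item) and
-- 0 ≤ c < len(item[r]), which Pre_ guarantees for every access both programs perform.
def pvEnt (item : List (List Int)) (r c : Int) : Int :=
  PySem.List.pyGetD (PySem.List.pyGetD item r []) c 0

-- ===== PORT A =====
def diagonal_right_matrix (item : List (List Int)) : List (List Int) :=
  let size : Int := item.length
  let new_item : List (List Int) := []
  let new_item := (PySem.List.pyRange (size - 1) 0 (-1)).foldl (fun acc j =>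
    acc ++ [(PySem.List.pyRange 0 (size - j) 1).map (fun i => pvEnt item (i + j) i)]) new_item
  let new_item := (PySem.List.pyRange 0 size 1).foldl (fun acc j =>
    acc ++ [(PySem.List.pyRange 0 (size - j) 1).map (fun i => pvEnt item i (i + j))]) new_item
  new_item

-- ===== PORT B =====
-- groups[d] in Source B raises only on a missing key; every d in the final range is a key
-- (it is r-c for some 0 ≤ r,c < size), so the total getD is exact here.
def diagonal_right_matrix_alt (item : List (List Int)) : List (List Int) :=
  let size : Int := item.length
  let groups : PySem.Dict Int (List Int) :=
    (PySem.List.pyRange 0 size 1).foldl (fun g r =>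
      let row := PySem.List.pyGetD item r []
      (PySem.List.pyRange 0 size 1).foldl (fun g c =>
        g.modify (r - c) [] (fun l => l ++ [PySem.List.pyGetD row c 0])) g)
      PySem.Dict.empty
  (PySem.List.pyRange (size - 1) (-size) (-1)).map (fun d => groups.getD d [])

-- ===== PRECONDITION & SPEC =====
-- A assumes a square matrix: it indexes column i (resp. i+j) of every row up to index
-- size-1, so it returns normally exactly when every row has at least len(item) entries
-- (and raises IndexError otherwise; Source B raises there too).
def Pre_diagonal_right_matrix (item : List (List Int)) : Prop :=
  ∀ row ∈ item, item.length ≤ row.length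
instance (item : List (List Int)) : Decidable (Pre_diagonal_right_matrix item) := by
  unfold Pre_diagonal_right_matrix; infer_instance
def pvWitness_diagonal_right_matrix : List (List Int) := [[1, 2], [3, 4]]
def Spec_diagonal_right_matrix (item : List (List Int)) (out : List (List Int)) : Prop :=
  out = diagonal_right_matrix_alt item
instance (item : List (List Int)) (out : List (List Int)) : Decidable (Spec_diagonal_right_matrix item out) := by
  unfold Spec_diagonal_right_matrix; infer_instance

-- ===== CLAIM =====
def Claim_equal_diagonal_right_matrix : Prop := ∀ (item : List (List Int)),
  Dom_diagonal_right_matrix item → Pre_diagonal_right_matrix item →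
  Spec_diagonal_right_matrix item (diagonal_right_matrix item)

-- ===== LEMMAS AND PROOFS =====

-- Canonical description of the diagonal with key d (= r - c) of an s × s matrix.
def pvDiagC (item : List (List Int)) (s : Nat) (d : Int) : List Int :=
  (List.range (s - d.natAbs)).map (fun (k : Nat) =>
    pvEnt item ((d.toNat : Int) + (k : Int)) ((d.toNat : Int) + (k : Int) - d))

lemma pv_filter_range_band (s : Nat) (d : Int) :
    (List.range s).filter (fun (r : Nat) => decide (0 ≤ (r : Int) - d) && decide ((r : Int) - d < (s : Int)))
      = (List.range (s - d.natAbs)).map (fun (k : Nat) => d.toNat + k) := by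
  by_cases hna : d.natAbs ≤ s
  · have hs : s = d.toNat + (s - d.natAbs) + (d.natAbs - d.toNat) := by omega
    rw [hs, List.range_add, List.range_add, List.filter_append, List.filter_append]
    rw [List.filter_eq_nil_iff.mpr (by intro x hx; simp at hx ⊢; omega)]
    rw [List.filter_map, List.filter_eq_self.mpr (by intro x hx; simp at hx ⊢; omega)]
    rw [List.filter_map, List.filter_eq_nil_iff.mpr (by intro x hx; simp at hx ⊢; omega)]
    have ht : d.toNat + (s - d.natAbs) + (d.natAbs - d.toNat) - d.natAbs = s - d.natAbs := by omega
    rw [ht]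
    simp
  · rw [List.filter_eq_nil_iff.mpr (by intro x hx; simp at hx ⊢; omega)]
    have : s - d.natAbs = 0 := by omega
    simp [this]

lemma pv_inner_getD (n : Nat) (r d : Int) (g : PySem.Dict Int (List Int)) (f : Int → Int) :
    ((List.range n).foldl (fun g (c : Nat) => g.modify (r - (c : Int)) [] (fun l => l ++ [f (c : Int)])) g).getD d []
      = g.getD d [] ++ (if 0 ≤ r - d ∧ r - d < (n : Int) then [f (r - d)] else []) := by
  induction n generalizing g d with
  | zero => simp
  | succ n ih =>
    rw [List.range_succ, List.foldl_append, List.foldl_cons, List.foldl_nil,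
      PySem.Dict.getD_modify]
    have hc : ((n + 1 : Nat) : Int) = (n : Int) + 1 := by push_cast; ring
    rw [hc]
    by_cases h : d = r - (n : Int)
    · rw [if_pos h, ih]
      subst h
      have h1 : r - (r - (n : Int)) = (n : Int) := by omega
      rw [h1, if_neg (by omega), if_pos (by omega)]
      simp
    · rw [if_neg h, ih]
      have hiff : (0 ≤ r - d ∧ r - d < (n : Int)) ↔ (0 ≤ r - d ∧ r - d < (n : Int) + 1) := by
        constructor <;> intro hh <;> constructor <;> omega
      rw [if_congr hiff rfl rfl]

lemma pv_outer_getD (item : List (List Int)) (m n : Nat) (d : Int) :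
    ((List.range m).foldl (fun g (r : Nat) =>
        (List.range n).foldl (fun g (c : Nat) =>
          g.modify ((r : Int) - (c : Int)) [] (fun l => l ++ [pvEnt item (r : Int) (c : Int)])) g)
        PySem.Dict.empty).getD d []
      = ((List.range m).filter (fun (r : Nat) => decide (0 ≤ (r : Int) - d) && decide ((r : Int) - d < (n : Int)))).map
          (fun (r : Nat) => pvEnt item (r : Int) ((r : Int) - d)) := by
  induction m with
  | zero => simp
  | succ m ih =>
    rw [List.range_succ, List.foldl_append, List.foldl_cons, List.foldl_nil,
      pv_inner_getD n (m : Int) d _ (fun c => pvEnt item (m : Int) c), ih,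
      List.filter_append, List.map_append]
    by_cases h : 0 ≤ (m : Int) - d ∧ (m : Int) - d < (n : Int)
    · rw [if_pos h]
      simp only [List.filter_cons, List.filter_nil]
      rw [if_pos (by simpa using h)]
      simp
    · rw [if_neg h]
      simp only [List.filter_cons, List.filter_nil]
      rw [if_neg (by simpa using h)]
      simp

-- B's dict lookup at key d is the canonical diagonal d.
lemma pv_alt_groups (item : List (List Int)) :
    diagonal_right_matrix_alt item
      = (PySem.List.pyRange ((item.length : Int) - 1) (-(item.length : Int)) (-1)).map
          (fun d => pvDiagC item item.length d) := by
  unfold diagonal_right_matrix_alt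
  simp only [PySem.List.pyRange_one]
  apply List.map_congr_left
  intro d _
  simp only [sub_zero, Int.toNat_natCast, zero_add, List.foldl_map]
  have h := pv_outer_getD item item.length item.length d
  simp only [pvEnt] at h
  rw [h, pv_filter_range_band, List.map_map]
  unfold pvDiagC
  apply List.map_congr_left
  intro k _
  simp only [Function.comp]
  congr 1

-- A's first-loop entry j (0 < j < s) is the canonical diagonal j.
lemma pv_A_loop1 (item : List (List Int)) (j : Int) (h0 : 0 < j) :
    (PySem.List.pyRange 0 ((item.length : Int) - j) 1).map (fun i => pvEnt item (i + j) i)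
      = pvDiagC item item.length j := by
  rw [PySem.List.pyRange_one]
  unfold pvDiagC
  have hlen : (((item.length : Int) - j) - 0).toNat = item.length - j.natAbs := by omega
  rw [hlen, List.map_map]
  apply List.map_congr_left
  intro k _
  simp only [Function.comp]
  congr 1 <;> omega

-- A's second-loop entry j (0 ≤ j) is the canonical diagonal -j.
lemma pv_A_loop2 (item : List (List Int)) (j : Int) (h0 : 0 ≤ j) :
    (PySem.List.pyRange 0 ((item.length : Int) - j) 1).map (fun i => pvEnt item i (i + j))
      = pvDiagC item item.length (-j) := by
  rw [PySem.List.pyRange_one]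
  unfold pvDiagC
  have hlen : (((item.length : Int) - j) - 0).toNat = item.length - (-j).natAbs := by omega
  rw [hlen, List.map_map]
  apply List.map_congr_left
  intro k _
  simp only [Function.comp]
  congr 1 <;> omega

-- ===== VERDICT =====
theorem diagonal_right_matrix_spec : Claim_equal_diagonal_right_matrix := by
  intro item _ _
  unfold Spec_diagonal_right_matrix
  rw [pv_alt_groups item]
  unfold diagonal_right_matrix
  simp only
  rw [PySem.List.foldl_append_singleton_eq_map, PySem.List.foldl_append_singleton_eq_map,
    List.nil_append]
  rcases Nat.eq_zero_or_pos item.length with hs | hs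
  · simp [hs, PySem.List.pyRange_one_eq_nil, PySem.List.pyRange_neg_one_eq_nil]
  · set s := item.length with hsdef
    rw [PySem.List.pyRange_neg_one, PySem.List.pyRange_neg_one, PySem.List.pyRange_one]
    have h1 : (((s : Int) - 1) - 0).toNat = s - 1 := by omega
    have h2 : (((s : Int) - 1) - (-(s : Int))).toNat = (s - 1) + s := by omega
    have h3 : ((s : Int) - 0).toNat = s := by omega
    rw [h1, h2, h3, List.range_add]
    simp only [List.map_append, List.map_map]
    refine congrArg₂ (fun a b : List (List Int) => a ++ b) ?_ ?_
    · apply List.map_congr_left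
      intro k hk
      simp only [Function.comp, List.mem_range] at *
      rw [pv_A_loop1 item ((s : Int) - 1 - (k : Int)) (by omega)]
    · apply List.map_congr_left
      intro k hk
      simp only [Function.comp, List.mem_range] at *
      rw [pv_A_loop2 item (0 + (k : Int)) (by omega)]
      congr 1
      omega
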